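-- pv_equiv track=rewrite | github.com/nhatminh23-03/CyberCoach | backend/app/services/voice_guard.py | build_voice_warnings
-- ===== SOURCE A (Python) =====
-- from typing import Any
--
-- def build_voice_warnings(findings: list[dict[str, Any]], voice_signals: list[dict[str, Any]]) -> list[str]:
--     warnings: list[str] = []
--     prioritized = sorted(
--         [item for item in findings if isinstance(item, dict)],
--         key=lambda item: 3 if item.get("severity") == "high" else 2 if item.get("severity") == "medium" else 1,
--         reverse=True,
--     )
--     for item in prioritized[:3]:
--         detail = str(item.get("detail") or "").strip()
--         if detail and detail not in warnings:
--             warnings.append(detail)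
--     for item in voice_signals[:2]:
--         detail = str(item.get("detail") or "").strip()
--         if detail and detail not in warnings:
--             warnings.append(detail)
--     return warnings[:4]
-- ===== SOURCE B (Python) =====
-- def build_voice_warnings(findings, voice_signals):
--     high, medium, other = [], [], []
--     for item in findings:
--         if isinstance(item, dict):
--             sev = item.get("severity")
--             bucket = high if sev == "high" else medium if sev == "medium" else other
--             bucket.append(item)
--     out = []
--     for item in (high + medium + other)[:3] + list(voice_signals[:2]):
--         detail = str(item.get("detail") or "").strip()
--         if detail and detail not in out:
--             out.append(detail)
--     return out[:4]
-- ===== Notes on version B (the rewrite author's own statement) =====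
-- stated objective: simpler
-- what changed: Replaces sorted(findings, key=severity-rank, reverse=True) with a single-pass stable partition into high/medium/other buckets and merges the two detail-collection loops into one loop over the concatenated candidate list.
import Mathlib
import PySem

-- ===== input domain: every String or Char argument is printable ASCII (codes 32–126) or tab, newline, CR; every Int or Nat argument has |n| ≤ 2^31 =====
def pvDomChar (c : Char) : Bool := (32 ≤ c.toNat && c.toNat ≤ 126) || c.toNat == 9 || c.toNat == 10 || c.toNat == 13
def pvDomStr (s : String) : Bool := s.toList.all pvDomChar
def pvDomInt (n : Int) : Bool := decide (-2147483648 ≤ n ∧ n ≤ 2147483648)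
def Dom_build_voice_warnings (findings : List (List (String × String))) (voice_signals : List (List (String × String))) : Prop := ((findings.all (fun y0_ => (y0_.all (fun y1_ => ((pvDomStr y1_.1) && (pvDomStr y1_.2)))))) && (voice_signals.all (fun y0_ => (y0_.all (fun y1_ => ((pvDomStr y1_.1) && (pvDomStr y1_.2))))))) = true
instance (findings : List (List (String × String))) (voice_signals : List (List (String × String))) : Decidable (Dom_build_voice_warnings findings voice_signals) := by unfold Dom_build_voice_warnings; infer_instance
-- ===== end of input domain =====

-- B replaces the key-based stable sort of findings by a one-pass three-way bucket partition
-- and merges the two detail-collection loops into one over the concatenation (objective: simpler).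

-- ===== PORT A =====
-- shared by both ports (the identical Python expression `str(item.get("detail") or "").strip()`):
def pvDetail (item : List (String × String)) : String :=
  PySem.Str.strip (PySem.Dict.getD ⟨item⟩ "detail" "")

-- the identical Python loop body `if detail and detail not in ws: ws.append(detail)`:
def pvAddDetail (ws : List String) (item : List (String × String)) : List String :=
  let detail := pvDetail item
  if detail ≠ "" ∧ detail ∉ ws then ws ++ [detail] else ws

-- sort key `3 if sev == "high" else 2 if sev == "medium" else 1`
def pvKeyA (item : List (String × String)) : Int :=
  if PySem.Dict.get? ⟨item⟩ "severity" = some "high" then 3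
  else if PySem.Dict.get? ⟨item⟩ "severity" = some "medium" then 2
  else 1

-- port of A; under the type convention every item is a dict, so the
-- `isinstance(item, dict)` comprehension filter keeps everything.
def build_voice_warnings (findings : List (List (String × String))) (voice_signals : List (List (String × String))) : List String :=
  let prioritized := PySem.List.sorted findings pvKeyA true
  let warnings := (PySem.List.slice prioritized none (some 3)).foldl pvAddDetail []
  let warnings := (PySem.List.slice voice_signals none (some 2)).foldl pvAddDetail warnings
  PySem.List.slice warnings none (some 4)

-- ===== PORT B =====
-- one-pass stable three-way bucket partition of findings by severity
def pvBucketStep (b : List (List (String × String)) × List (List (String × String)) × List (List (String × String)))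
    (item : List (String × String)) :
    List (List (String × String)) × List (List (String × String)) × List (List (String × String)) :=
  let sev := PySem.Dict.get? ⟨item⟩ "severity"
  if sev = some "high" then (b.1 ++ [item], b.2.1, b.2.2)
  else if sev = some "medium" then (b.1, b.2.1 ++ [item], b.2.2)
  else (b.1, b.2.1, b.2.2 ++ [item])

def build_voice_warnings_alt (findings : List (List (String × String))) (voice_signals : List (List (String × String))) : List String :=
  let b := findings.foldl pvBucketStep ([], [], [])
  let prioritized := PySem.List.slice (b.1 ++ b.2.1 ++ b.2.2) none (some 3)
  let out := (prioritized ++ PySem.List.slice voice_signals none (some 2)).foldl pvAddDetail []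
  PySem.List.slice out none (some 4)

-- ===== PRECONDITION & SPEC =====
def Spec_build_voice_warnings (findings : List (List (String × String))) (voice_signals : List (List (String × String))) (out : List String) : Prop := out = build_voice_warnings_alt findings voice_signals
instance (findings : List (List (String × String))) (voice_signals : List (List (String × String))) (out : List String) : Decidable (Spec_build_voice_warnings findings voice_signals out) := by unfold Spec_build_voice_warnings; infer_instance

-- ===== CLAIM (what is proved, stated in full; the proofs are below) =====
def Claim_equal_build_voice_warnings : Prop := ∀ (findings : List (List (String × String))) (voice_signals : List (List (String × String))), Dom_build_voice_warnings findings voice_signals → Spec_build_voice_warnings findings voice_signals (build_voice_warnings findings voice_signals)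

-- ===== LEMMAS AND PROOFS =====

theorem insertBy_skip {α : Type} (before : α → α → Bool) (x : α) (p q : List α)
    (h : ∀ y ∈ p, before x y = false) :
    PySem.List.insertBy before x (p ++ q) = p ++ PySem.List.insertBy before x q := by
  induction p with
  | nil => rfl
  | cons z zs ih =>
      simp only [List.cons_append, PySem.List.insertBy, h z (by simp), Bool.false_eq_true,
        if_false, List.cons.injEq, true_and]
      exact ih (fun y hy => h y (by simp [hy]))

theorem insertBy_front {α : Type} (before : α → α → Bool) (x : α) (q : List α)
    (h : ∀ y ∈ q, before x y = true) :
    PySem.List.insertBy before x q = x :: q := by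
  cases q with
  | nil => rfl
  | cons z zs => simp [PySem.List.insertBy, h z (by simp)]

theorem insertBy_end {α : Type} (before : α → α → Bool) (x : α) (p : List α)
    (h : ∀ y ∈ p, before x y = false) :
    PySem.List.insertBy before x p = p ++ [x] := by
  have := insertBy_skip before x p [] h
  simpa using this

theorem sorted3 {α : Type} (key : α → Int) (xs : List α)
    (hk : ∀ a, key a = 3 ∨ key a = 2 ∨ key a = 1) :
    PySem.List.sorted xs key true =
      xs.filter (fun a => key a = 3) ++ xs.filter (fun a => key a = 2) ++ xs.filter (fun a => key a = 1) := by
  induction xs using List.reverseRecOn with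
  | nil => rfl
  | append_singleton xs x ih =>
      have hstep : PySem.List.sorted (xs ++ [x]) key true =
          PySem.List.insertBy (fun a b => decide (key b < key a)) x (PySem.List.sorted xs key true) := by
        simp [PySem.List.sorted, List.foldl_append]
      rw [hstep, ih, List.append_assoc]
      have m3 : ∀ y ∈ xs.filter (fun a => key a = 3), key y = 3 := by
        intro y hy; simp only [List.mem_filter, decide_eq_true_eq] at hy; exact hy.2
      have m2 : ∀ y ∈ xs.filter (fun a => key a = 2), key y = 2 := by
        intro y hy; simp only [List.mem_filter, decide_eq_true_eq] at hy; exact hy.2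
      have m1 : ∀ y ∈ xs.filter (fun a => key a = 1), key y = 1 := by
        intro y hy; simp only [List.mem_filter, decide_eq_true_eq] at hy; exact hy.2
      rcases hk x with h3 | h2 | h1
      · rw [insertBy_skip _ x _ _ (by
            intro y hy
            have := m3 y hy
            simp only [decide_eq_false_iff_not]; omega),
          insertBy_front _ x _ (by
            intro y hy
            rcases List.mem_append.mp hy with hy | hy
            · have := m2 y hy; simp only [decide_eq_true_eq]; omega
            · have := m1 y hy; simp only [decide_eq_true_eq]; omega)]
        simp [List.filter_append, h3, List.append_assoc]
      · rw [insertBy_skip _ x _ _ (by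
            intro y hy
            have := m3 y hy
            simp only [decide_eq_false_iff_not]; omega),
          insertBy_skip _ x _ _ (by
            intro y hy
            have := m2 y hy
            simp only [decide_eq_false_iff_not]; omega),
          insertBy_front _ x _ (by
            intro y hy
            have := m1 y hy
            simp only [decide_eq_true_eq]; omega)]
        simp [List.filter_append, h2, List.append_assoc]
      · rw [insertBy_skip _ x _ _ (by
            intro y hy
            have := m3 y hy
            simp only [decide_eq_false_iff_not]; omega),
          insertBy_skip _ x _ _ (by
            intro y hy
            have := m2 y hy
            simp only [decide_eq_false_iff_not]; omega),
          insertBy_end _ x _ (by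
            intro y hy
            have := m1 y hy
            simp only [decide_eq_false_iff_not]; omega)]
        simp [List.filter_append, h1, List.append_assoc]

theorem key_cases (i : List (String × String)) : pvKeyA i = 3 ∨ pvKeyA i = 2 ∨ pvKeyA i = 1 := by
  unfold pvKeyA; split_ifs <;> simp

theorem buckets_eq (xs : List (List (String × String)))
    (a b c : List (List (String × String))) :
    xs.foldl pvBucketStep (a, b, c) =
      (a ++ xs.filter (fun i => pvKeyA i = 3),
       b ++ xs.filter (fun i => pvKeyA i = 2),
       c ++ xs.filter (fun i => pvKeyA i = 1)) := by
  induction xs generalizing a b c with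
  | nil => simp
  | cons x xs ih =>
      by_cases h1 : PySem.Dict.get? ⟨x⟩ "severity" = some "high"
      · have hk : pvKeyA x = 3 := by simp [pvKeyA, h1]
        simp only [List.foldl_cons, pvBucketStep, h1, if_pos]
        rw [ih]
        simp [hk, List.append_assoc]
      · by_cases h2 : PySem.Dict.get? ⟨x⟩ "severity" = some "medium"
        · have hk : pvKeyA x = 2 := by simp [pvKeyA, h2]
          simp only [List.foldl_cons, pvBucketStep, h2, if_pos]
          rw [ih]
          simp [hk, List.append_assoc]
        · have hk : pvKeyA x = 1 := by simp [pvKeyA, h1, h2]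
          simp only [List.foldl_cons, pvBucketStep, h1, h2]
          rw [ih]
          simp [hk, List.append_assoc]

-- ===== VERDICT (by name: the statement is the Claim_ definition above) =====
theorem build_voice_warnings_spec : Claim_equal_build_voice_warnings := by
  intro findings voice_signals _
  show build_voice_warnings findings voice_signals = build_voice_warnings_alt findings voice_signals
  unfold build_voice_warnings build_voice_warnings_alt
  rw [sorted3 pvKeyA findings key_cases, buckets_eq findings [] [] []]
  simp only [List.nil_append, List.foldl_append]
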